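-- pv_equiv track=rewrite | github.com/Fvegini/Pokemon-Shuffle-Move-Helper | app/src/custom_utils.py | split_list_to_dict
-- ===== SOURCE A (Python) =====
-- def split_list_to_dict(complete_list, interest_list):
--     result_dict = {key: [] for key in interest_list}
--     for idx, string in enumerate(complete_list):
--         if string not in interest_list:
--             continue
--         if string not in result_dict:
--             result_dict[string] = []
--         result_dict[string].append(idx)
--     return result_dict
-- ===== SOURCE B (Python) =====
-- def split_list_to_dict(complete_list, interest_list):
--     return {key: [i for i, s in enumerate(complete_list) if s == key]
--             for key in interest_list}
-- ===== Notes on version B (the rewrite author's own statement) =====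
-- stated objective: idiomatic
-- what changed: Replaced A's flat pass over complete_list with a pre-seeded dict and per-element membership branch by a dict comprehension keyed by interest_list whose value is a per-key scan of complete_list for matching indices.
import Mathlib
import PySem

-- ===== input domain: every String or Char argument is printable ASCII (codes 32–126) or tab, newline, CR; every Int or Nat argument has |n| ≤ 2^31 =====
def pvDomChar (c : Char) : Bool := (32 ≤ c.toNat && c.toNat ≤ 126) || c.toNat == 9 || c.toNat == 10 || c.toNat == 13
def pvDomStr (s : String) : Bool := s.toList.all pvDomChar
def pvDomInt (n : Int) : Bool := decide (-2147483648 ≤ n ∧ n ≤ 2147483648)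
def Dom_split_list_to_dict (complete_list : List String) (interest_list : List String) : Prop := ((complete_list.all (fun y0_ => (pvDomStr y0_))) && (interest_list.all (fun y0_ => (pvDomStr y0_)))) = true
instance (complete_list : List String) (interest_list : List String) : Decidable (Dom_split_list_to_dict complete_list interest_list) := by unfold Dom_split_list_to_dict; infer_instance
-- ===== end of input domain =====

-- B is the idiomatic dict comprehension keyed by interest_list (per-key scan of complete_list); same cost, no speed claim.

-- ===== PORT A =====
-- A: seed a dict with every interest key, then one pass over enumerate(complete_list)
-- appending each index to its key's list (the 'not in result_dict' re-seed branch kept).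
def split_list_to_dict (complete_list : List String) (interest_list : List String) : List (String × List Int) :=
  let result_dict : PySem.Dict String (List Int) :=
    interest_list.foldl (fun d key => d.insert key ([] : List Int)) PySem.Dict.empty
  let result_dict :=
    (PySem.List.enumerate complete_list 0).foldl (fun d p =>
      if p.2 ∈ interest_list then
        let d := if d.contains p.2 then d else d.insert p.2 ([] : List Int)
        d.modify p.2 [] (fun v => v ++ [p.1])
      else d) result_dict
  result_dict.items

-- ===== PORT B =====
-- B: {key: [i for i, s in enumerate(complete_list) if s == key] for key in interest_list}
def split_list_to_dict_alt (complete_list : List String) (interest_list : List String) : List (String × List Int) :=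
  (interest_list.foldl (fun d key =>
      d.insert key (((PySem.List.enumerate complete_list 0).filter (fun p => p.2 == key)).map (·.1)))
    PySem.Dict.empty).items

-- ===== PRECONDITION & SPEC =====
def Spec_split_list_to_dict (complete_list : List String) (interest_list : List String) (out : List (String × List Int)) : Prop := out = split_list_to_dict_alt complete_list interest_list
instance (complete_list : List String) (interest_list : List String) (out : List (String × List Int)) : Decidable (Spec_split_list_to_dict complete_list interest_list out) := by unfold Spec_split_list_to_dict; infer_instance

-- ===== CLAIM (what is proved, stated in full; the proofs are below) =====
def Claim_equal_split_list_to_dict : Prop := ∀ (complete_list : List String) (interest_list : List String), Dom_split_list_to_dict complete_list interest_list → Spec_split_list_to_dict complete_list interest_list (split_list_to_dict complete_list interest_list)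

-- ===== LEMMAS AND PROOFS =====

-- Lookup in a fold of inserts whose value depends only on the key.
theorem pv_getD_foldl_insert (f : String → List Int) :
    ∀ (l : List String) (d : PySem.Dict String (List Int)) (k : String),
      (l.foldl (fun d k => d.insert k (f k)) d).getD k []
        = if k ∈ l then f k else d.getD k [] := by
  intro l
  induction l with
  | nil => intro d k; simp
  | cons x t ih =>
    intro d k
    rw [List.foldl_cons, ih]
    by_cases ht : k ∈ t
    · simp [ht]
    · by_cases hx : k = x
      · subst hx; simp [ht]
      · simp [ht, hx, PySem.Dict.getD_insert]

-- A fold of inserts over the key list, value a function of the key: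
-- the items list is the first-occurrence dedup of the keys paired with their values.
theorem pv_items_foldl_insert (f : String → List Int) (l : List String) :
    (l.foldl (fun d k => d.insert k (f k)) PySem.Dict.empty).items
      = (PySem.Set.ofList l).map (fun k => (k, f k)) := by
  set d := l.foldl (fun d k => d.insert k (f k)) PySem.Dict.empty with hd
  have hkeys : d.keys = PySem.Set.ofList l := by
    rw [hd, PySem.Dict.keys_foldl_insert l (fun _ k => f k) PySem.Dict.empty]
    simpa using PySem.Set.update_empty l
  have hnd : d.keys.Nodup := by rw [hkeys]; exact PySem.Set.nodup_ofList l
  rw [PySem.Dict.items_eq_map_keys d hnd ([] : List Int), hkeys]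
  apply List.map_congr_left
  intro k hk
  have hkl : k ∈ l := (PySem.Set.mem_ofList l k).1 hk
  rw [hd, pv_getD_foldl_insert f l PySem.Dict.empty k]
  simp [hkl]

-- A's main loop: appending index p.1 to key p.2 (guarded by membership in il) grows each
-- seeded key's list by exactly the matching indices, in order.
theorem pv_items_main_loop (il : List String) :
    ∀ (l : List (Int × String)) (d : PySem.Dict String (List Int)) (g : String → List Int),
      d.keys = PySem.Set.ofList il →
      d.items = d.keys.map (fun k => (k, g k)) →
      (l.foldl (fun d p =>
          if p.2 ∈ il then
            (if d.contains p.2 then d else d.insert p.2 ([] : List Int)).modify p.2 []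
              (fun v => v ++ [p.1])
          else d) d).items
        = d.keys.map (fun k => (k, g k ++ (l.filter (fun p => p.2 == k)).map (·.1))) := by
  intro l
  induction l with
  | nil =>
    intro d g hk h
    simpa using h
  | cons p t ih =>
    intro d g hk h
    rw [List.foldl_cons]
    by_cases hm : p.2 ∈ il
    · have hnd : d.keys.Nodup := by rw [hk]; exact PySem.Set.nodup_ofList il
      have hmem : p.2 ∈ d.keys := by
        rw [hk]; exact (PySem.Set.mem_ofList il p.2).2 hm
      have hc : d.contains p.2 = true := (PySem.Dict.contains_iff_mem_keys _ _).2 hmem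
      simp only [hm, if_pos, hc]
      set d' := d.modify p.2 [] (fun v => v ++ [p.1]) with hd'
      have hk' : d'.keys = d.keys :=
        (PySem.Dict.keys_modify d p.2 [] (fun v => v ++ [p.1])).trans
          (PySem.Dict.keys_insert_of_contains d _ hc)
      have hgd : ∀ k ∈ d.keys, d.getD k [] = g k := by
        intro k hkm
        have : (k, g k) ∈ d.items := by rw [h]; exact List.mem_map_of_mem hkm
        exact PySem.Dict.getD_of_mem_items d this hnd []
      have hitems' : d'.items = d'.keys.map
          (fun k => (k, if k = p.2 then g p.2 ++ [p.1] else g k)) := by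
        rw [PySem.Dict.items_eq_map_keys d' (hk' ▸ hnd) ([] : List Int), hk']
        apply List.map_congr_left
        intro k hkm
        rw [hd', PySem.Dict.getD_modify]
        by_cases hkp : k = p.2 <;> simp [hkp, hgd _ hkm, hgd _ hmem]
      rw [ih d' _ (hk' ▸ hk) hitems', hk']
      apply List.map_congr_left
      intro k hkm
      by_cases hkp : k = p.2
      · subst hkp
        simp
      · have hpk : p.2 ≠ k := fun h => hkp h.symm
        simp [hkp, hpk]
    · simp only [hm, if_false]
      rw [ih d g hk h]
      apply List.map_congr_left
      intro k hkm
      have hne : p.2 ≠ k := by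
        intro he
        exact hm (he ▸ ((PySem.Set.mem_ofList il k).1 (hk ▸ hkm)))
      simp [hne]

theorem split_list_to_dict_eq (complete_list interest_list : List String) :
    split_list_to_dict complete_list interest_list
      = split_list_to_dict_alt complete_list interest_list := by
  unfold split_list_to_dict split_list_to_dict_alt
  simp only []
  set d0 := interest_list.foldl (fun d key => d.insert key ([] : List Int)) PySem.Dict.empty with hd0
  have hk0 : d0.keys = PySem.Set.ofList interest_list := by
    rw [hd0, PySem.Dict.keys_foldl_insert interest_list (fun _ k => ([] : List Int)) PySem.Dict.empty]
    simpa using PySem.Set.update_empty interest_list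
  have hi0 : d0.items = d0.keys.map (fun k => (k, ([] : List Int))) := by
    rw [hd0, pv_items_foldl_insert (fun _ => ([] : List Int)) interest_list, ← hd0, hk0]
  rw [pv_items_main_loop interest_list (PySem.List.enumerate complete_list 0) d0 _ hk0 hi0,
      pv_items_foldl_insert
      (fun key => (((PySem.List.enumerate complete_list 0).filter (fun p => p.2 == key)).map (·.1)))
      interest_list, hk0]
  simp

-- ===== VERDICT (by name: the statement is the Claim_ definition above) =====
theorem split_list_to_dict_spec : Claim_equal_split_list_to_dict := by
  intro complete_list interest_list _
  exact split_list_to_dict_eq complete_list interest_list
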